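-- pv_equiv track=rewrite | github.com/hook923/scrapy-redis-zhihu | zhuanlan_zhihu/spiders/Zhuanlanspider.py | dealIddata
-- ===== SOURCE A (Python) =====
-- def dealIddata(iddata):
--     num=0
--     newdata=iddata
--     for i in range(len(newdata)-1,0,-1):
--         if newdata[i]=="]":
--             num+=1
--             if num==1:
--                 newdata=newdata[:i]+'''"'''+newdata[i+1:]
--             else:
--                 newdata=newdata[:i]+newdata[i+1:]
--             continue
--         if newdata[i]=="[":
--             num-=1
--             if num==0:
--                 newdata=newdata[:i]+'''"'''+newdata[i+1:]
--             else:
--                 newdata=newdata[:i]+newdata[i+1:]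
--             continue
--         if num>0:
--             newdata=newdata[:i]+newdata[i+1:]
--     return newdata
-- ===== SOURCE B (Python) =====
-- def dealIddata(iddata):
--     # Single right-to-left pass building the characters, one join at the end.
--     if not iddata:
--         return iddata
--     head, rest = iddata[0], iddata[1:]
--     out = []
--     num = 0
--     for c in reversed(rest):
--         if c == "]":
--             num += 1
--             if num == 1:
--                 out.append('"')
--         elif c == "[":
--             num -= 1
--             if num == 0:
--                 out.append('"')
--         elif num <= 0:
--             out.append(c)
--     out.reverse()
--     return head + ''.join(out)
-- ===== Notes on version B (the rewrite author's own statement) =====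
-- stated objective: alternative
-- what changed: A repeatedly rebuilds the whole string by slice concatenation inside a downward index loop; B makes one right-to-left pass over the tail, collecting emitted characters in a list and joining once (linear in all cases, but a timing run did not confirm a 1.5x speed-up on the generated inputs).
import Mathlib
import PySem

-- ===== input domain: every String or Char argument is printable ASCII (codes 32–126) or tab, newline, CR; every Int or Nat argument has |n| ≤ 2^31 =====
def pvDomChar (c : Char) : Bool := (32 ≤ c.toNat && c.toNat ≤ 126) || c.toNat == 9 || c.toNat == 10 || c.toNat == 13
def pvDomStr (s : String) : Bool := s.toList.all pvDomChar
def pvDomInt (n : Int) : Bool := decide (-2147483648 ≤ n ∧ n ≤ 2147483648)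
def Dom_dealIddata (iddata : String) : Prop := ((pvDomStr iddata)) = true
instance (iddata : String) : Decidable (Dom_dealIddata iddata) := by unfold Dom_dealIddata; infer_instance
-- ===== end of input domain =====

-- B replaces A's repeated-slicing downward index loop by one right-to-left pass that
-- emits characters into a list joined once (a different algorithm of linear cost).

-- ===== PORT A =====
-- one loop iteration of A: index i into the current newdata (always in range, so getD default is never used)
def dealStepA (st : List Char × Int) (i : Int) : List Char × Int :=
  let nd := st.1
  let num := st.2
  let c := (PySem.List.pyGet? nd i).getD ' '
  if c = ']' then
    let num := num + 1
    if num = 1 then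
      (PySem.List.slice nd none (some i) ++ ['"'] ++ PySem.List.slice nd (some (i+1)) none, num)
    else
      (PySem.List.slice nd none (some i) ++ PySem.List.slice nd (some (i+1)) none, num)
  else if c = '[' then
    let num := num - 1
    if num = 0 then
      (PySem.List.slice nd none (some i) ++ ['"'] ++ PySem.List.slice nd (some (i+1)) none, num)
    else
      (PySem.List.slice nd none (some i) ++ PySem.List.slice nd (some (i+1)) none, num)
  else if num > 0 then
    (PySem.List.slice nd none (some i) ++ PySem.List.slice nd (some (i+1)) none, num)
  else
    (nd, num)

def dealIddata (iddata : String) : String :=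
  String.ofList
    ((PySem.List.pyRange ((iddata.toList.length : Int) - 1) 0 (-1)).foldl dealStepA
      (iddata.toList, 0)).1

-- ===== PORT B =====
-- one step of B's reverse pass: consume char c (right-to-left), cons any emission onto acc
def dealStepB (c : Char) (st : List Char × Int) : List Char × Int :=
  let acc := st.1
  let num := st.2
  if c = ']' then
    let num := num + 1
    (if num = 1 then '"' :: acc else acc, num)
  else if c = '[' then
    let num := num - 1
    (if num = 0 then '"' :: acc else acc, num)
  else if num ≤ 0 then (c :: acc, num) else (acc, num)

def dealIddata_alt (iddata : String) : String :=
  match iddata.toList with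
  | [] => iddata
  | h :: rest =>
    -- Source B iterates reversed(rest) appending then reverses once; consing while folding
    -- over rest.reverse builds the same left-to-right list
    String.ofList (h :: (rest.reverse.foldl (fun st c => dealStepB c st) ([], 0)).1)

-- ===== PRECONDITION & SPEC =====
def Spec_dealIddata (iddata : String) (out : String) : Prop := out = dealIddata_alt iddata
instance (iddata : String) (out : String) : Decidable (Spec_dealIddata iddata out) := by unfold Spec_dealIddata; infer_instance

-- ===== CLAIM (what is proved, stated in full; the proofs are below) =====
def Claim_equal_dealIddata : Prop := ∀ (iddata : String), Dom_dealIddata iddata → Spec_dealIddata iddata (dealIddata iddata)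

-- ===== LEMMAS AND PROOFS =====

theorem pyRange_negOne (a b : Int) :
    PySem.List.pyRange a b (-1) = (List.range (a - b).toNat).map (fun k : Nat => a - (k : Int)) := by
  unfold PySem.List.pyRange
  rcases lt_or_ge b a with h | h
  · have h1 : ((-1 : Int) = 0) = False := by simp
    simp only [if_neg (by omega : ¬ ((-1:Int) = 0)), if_neg (by omega : ¬ ((0:Int) < -1)), if_pos h]
    have : (a - b + -(-1) - 1) / -(-1) = a - b := by norm_num
    rw [this]
    apply List.map_congr_left
    intro k _; ring
  · simp only [if_neg (by omega : ¬ ((-1:Int) = 0)), if_neg (by omega : ¬ ((0:Int) < -1)),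
      if_neg (not_lt.mpr h)]
    have : (a - b).toNat = 0 := by omega
    simp [this]

theorem pyRange_negOne_cons (a b : Int) (h : b < a) :
    PySem.List.pyRange a b (-1) = a :: PySem.List.pyRange (a - 1) b (-1) := by
  rw [pyRange_negOne, pyRange_negOne]
  have h1 : (a - b).toNat = (a - 1 - b).toNat + 1 := by omega
  rw [h1, List.range_succ_eq_map, List.map_cons, List.map_map]
  congr 1
  · simp
  apply List.map_congr_left
  intro k _
  simp only [Function.comp]
  push_cast
  ring

theorem pyRange_negOne_nil (a b : Int) (h : a ≤ b) :
    PySem.List.pyRange a b (-1) = [] := by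
  rw [pyRange_negOne]
  have : (a - b).toNat = 0 := by omega
  simp [this]

-- A's loop invariant: with pre nonempty, processing the indices of suf (rightmost first)
-- inside pre ++ suf ++ tail yields foldr dealStepB with base (tail, num).
theorem loopA_eq (suf : List Char) : ∀ (pre tail : List Char) (num : Int), pre ≠ [] →
    (PySem.List.pyRange ((pre.length : Int) + suf.length - 1) ((pre.length : Int) - 1) (-1)).foldl
        dealStepA (pre ++ suf ++ tail, num)
      = (pre ++ (suf.foldr dealStepB (tail, num)).1, (suf.foldr dealStepB (tail, num)).2) := by
  induction suf using List.reverseRecOn with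
  | nil =>
    intro pre tail num _
    rw [pyRange_negOne_nil _ _ (by simp)]
    simp
  | append_singleton ys c ih =>
    intro pre tail num hpre
    have hidx : ((pre.length : Int) + (ys ++ [c]).length - 1) = (pre.length : Int) + ys.length := by
      simp; omega
    rw [hidx, pyRange_negOne_cons _ _ (by have : 0 < pre.length := List.length_pos_of_ne_nil hpre; omega)]
    rw [List.foldl_cons]
    have hget : PySem.List.pyGet? (pre ++ (ys ++ [c]) ++ tail) ((pre.length : Int) + ys.length)
        = some c := by
      have h1 : pre ++ (ys ++ [c]) ++ tail = (pre ++ ys) ++ c :: tail := by simp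
      have h2 : ((pre.length : Int) + ys.length) = ((pre ++ ys).length : Int) := by simp
      rw [h1, h2, PySem.List.pyGet?_append_length]
    have hslice1 : PySem.List.slice (pre ++ (ys ++ [c]) ++ tail) none
        (some ((pre.length : Int) + ys.length)) = pre ++ ys := by
      have h2 : ((pre.length : Int) + ys.length) = (((pre ++ ys).length : Nat) : Int) := by simp
      rw [h2, PySem.List.slice_to_natCast]
      have h3 : pre ++ (ys ++ [c]) ++ tail = (pre ++ ys) ++ (c :: tail) := by simp
      rw [h3, List.take_left']
      simp
    have hslice2 : PySem.List.slice (pre ++ (ys ++ [c]) ++ tail)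
        (some ((pre.length : Int) + ys.length + 1)) none = tail := by
      have h2 : ((pre.length : Int) + ys.length + 1) = (((pre ++ ys ++ [c]).length : Nat) : Int) := by
        simp; omega
      rw [h2, PySem.List.slice_from_natCast]
      have h3 : pre ++ (ys ++ [c]) ++ tail = (pre ++ ys ++ [c]) ++ tail := by simp
      rw [h3, List.drop_left]
    have hstep : dealStepA (pre ++ (ys ++ [c]) ++ tail, num) ((pre.length : Int) + ys.length)
        = (pre ++ ys ++ (dealStepB c (tail, num)).1, (dealStepB c (tail, num)).2) := by
      simp only [dealStepA, dealStepB, hget, Option.getD_some, hslice1, hslice2]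
      by_cases hc1 : c = ']'
      · simp only [hc1]
        by_cases h0 : num + 1 = 1 <;> simp [h0]
      · by_cases hc2 : c = '['
        · simp only [hc2, if_neg (by decide : ¬ ('[' = ']'))]
          by_cases h0 : num - 1 = 0 <;> simp [h0]
        · simp only [if_neg hc1, if_neg hc2]
          by_cases hn : num > 0
          · simp [hn, not_le.mpr hn]
          · simp only [if_neg hn, if_pos (not_lt.mp hn)]
            simp
    rw [hstep, List.foldr_append]
    have h := ih pre (dealStepB c (tail, num)).1 (dealStepB c (tail, num)).2 hpre
    simpa using h

-- ===== VERDICT (by name: the statement is the Claim_ definition above) =====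
theorem dealIddata_spec : Claim_equal_dealIddata := by
  intro iddata _
  unfold Spec_dealIddata dealIddata dealIddata_alt
  cases hl : iddata.toList with
  | nil =>
    rw [pyRange_negOne_nil _ _ (by simp)]
    have h0 : iddata = "" := by
      have h1 := congrArg String.ofList hl
      rwa [String.ofList_toList] at h1
    rw [h0]
    rfl
  | cons h rest =>
    have key := loopA_eq rest [h] [] 0 (by simp)
    rw [(by simp : (([h].length : Int) + rest.length - 1) = ((h :: rest).length : Int) - 1),
        (by simp : (([h].length : Int) - 1) = (0 : Int))] at key
    simp only [List.singleton_append, List.append_nil] at key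
    rw [key]
    simp only [List.foldl_reverse]
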